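-- pv_equiv track=rewrite | github.com/cirosantilli/project-euler-solvers | solvers/300.py | _max_slices
-- ===== SOURCE A (Python) =====
-- from typing import List
--
-- def _max_slices(A: List[int], B: List[int], bits: int, mask_all: int) -> List[int]:
--     """
--     Bit-sliced max: C = max(A, B) per position, returning `bits` slices.
--     """
--     gt = 0
--     eq = mask_all
--     for k in range(bits - 1, -1, -1):
--         ai = A[k] if k < len(A) else 0
--         bi = B[k] if k < len(B) else 0
--         gt |= eq & bi & (mask_all ^ ai)  # bi & ~ai
--         eq &= mask_all ^ (ai ^ bi)  # ~(ai^bi)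
--     not_gt = mask_all ^ gt
--
--     res = [0] * bits
--     for k in range(bits):
--         ai = A[k] if k < len(A) else 0
--         bi = B[k] if k < len(B) else 0
--         res[k] = (ai & not_gt) | (bi & gt)
--     return res
-- ===== SOURCE B (Python) =====
-- from typing import List
--
-- def _max_slices(A: List[int], B: List[int], bits: int, mask_all: int) -> List[int]:
--     """
--     Bit-sliced max via a ripple-borrow subtraction A - B running LSB -> MSB:
--     the final borrow mask is exactly the per-position "B > A" mask (ties give
--     borrow 0, i.e. select A, matching the MSB-first scan's tie behaviour).
--     """
--     def sl(X, k):
--         return X[k] if k < len(X) else 0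
--     gt = 0  # running borrow of A - B, confined to mask_all each step
--     for k in range(bits):
--         ai, bi = sl(A, k), sl(B, k)
--         gt = (((mask_all ^ ai) & (bi ^ gt)) | (bi & gt)) & mask_all
--     not_gt = mask_all ^ gt
--     return [(sl(A, k) & not_gt) | (sl(B, k) & gt) for k in range(bits)]
-- ===== Notes on version B (the rewrite author's own statement) =====
-- stated objective: alternative
-- what changed: Replaces the MSB-to-LSB scan maintaining a (gt, eq) pair of masks with a single LSB-to-MSB ripple-borrow subtraction A-B whose final borrow mask is the 'B>A' selector.
import Mathlib
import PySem

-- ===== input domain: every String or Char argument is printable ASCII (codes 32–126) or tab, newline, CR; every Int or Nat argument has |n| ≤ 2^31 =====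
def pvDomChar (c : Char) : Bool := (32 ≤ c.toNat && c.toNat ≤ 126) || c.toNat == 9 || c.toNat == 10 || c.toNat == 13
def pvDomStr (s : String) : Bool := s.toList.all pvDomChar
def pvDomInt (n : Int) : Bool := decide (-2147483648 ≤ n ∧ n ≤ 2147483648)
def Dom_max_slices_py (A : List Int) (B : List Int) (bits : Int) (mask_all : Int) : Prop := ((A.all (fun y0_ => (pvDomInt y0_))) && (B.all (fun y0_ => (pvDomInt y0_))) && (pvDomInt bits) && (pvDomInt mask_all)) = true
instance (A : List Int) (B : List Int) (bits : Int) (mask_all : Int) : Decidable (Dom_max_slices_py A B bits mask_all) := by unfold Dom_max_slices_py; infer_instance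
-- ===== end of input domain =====

-- B replaces A's MSB→LSB (gt, eq) two-mask scan by a single LSB→MSB ripple-borrow
-- subtraction of A−B (objective: alternative decomposition, same O(bits) cost).

-- ===== PORT A =====
-- Literal port of A: a descending loop folding the (gt, eq) pair, then a loop
-- writing res[k]; the in-range guarded indexing 'X[k] if k < len(X) else 0' is
-- ported as a guarded pyGetD (the default is unreachable: 0 ≤ k < len under the guard).
def max_slices_py (A : List Int) (B : List Int) (bits : Int) (mask_all : Int) : List Int :=
  let ge := (PySem.List.pyRange (bits - 1) (-1) (-1)).foldl
    (fun (ge : Int × Int) k =>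
      let ai := if k < (A.length : Int) then PySem.List.pyGetD A k 0 else 0
      let bi := if k < (B.length : Int) then PySem.List.pyGetD B k 0 else 0
      (PySem.Int.bor ge.1 (PySem.Int.band (PySem.Int.band ge.2 bi) (PySem.Int.bxor mask_all ai)),
       PySem.Int.band ge.2 (PySem.Int.bxor mask_all (PySem.Int.bxor ai bi))))
    (0, mask_all)
  let gt := ge.1
  let not_gt := PySem.Int.bxor mask_all gt
  (PySem.List.pyRange 0 bits 1).map (fun k =>
    let ai := if k < (A.length : Int) then PySem.List.pyGetD A k 0 else 0
    let bi := if k < (B.length : Int) then PySem.List.pyGetD B k 0 else 0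
    PySem.Int.bor (PySem.Int.band ai not_gt) (PySem.Int.band bi gt))

-- ===== PORT B =====
-- helper sl(X, k) of Source B
def pvSl (X : List Int) (k : Int) : Int :=
  if k < (X.length : Int) then PySem.List.pyGetD X k 0 else 0

def max_slices_py_alt (A : List Int) (B : List Int) (bits : Int) (mask_all : Int) : List Int :=
  let gt := (PySem.List.pyRange 0 bits 1).foldl
    (fun borrow k =>
      PySem.Int.band
        (PySem.Int.bor
          (PySem.Int.band (PySem.Int.bxor mask_all (pvSl A k)) (PySem.Int.bxor (pvSl B k) borrow))
          (PySem.Int.band (pvSl B k) borrow))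
        mask_all)
    0
  let not_gt := PySem.Int.bxor mask_all gt
  (PySem.List.pyRange 0 bits 1).map (fun k =>
    PySem.Int.bor (PySem.Int.band (pvSl A k) not_gt) (PySem.Int.band (pvSl B k) gt))

-- ===== PRECONDITION & SPEC =====
def Spec_max_slices_py (A : List Int) (B : List Int) (bits : Int) (mask_all : Int) (out : List Int) : Prop := out = max_slices_py_alt A B bits mask_all
instance (A : List Int) (B : List Int) (bits : Int) (mask_all : Int) (out : List Int) : Decidable (Spec_max_slices_py A B bits mask_all out) := by unfold Spec_max_slices_py; infer_instance

-- ===== CLAIM (what is proved, stated in full; the proofs are below) =====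
def Claim_equal_max_slices_py : Prop := ∀ (A : List Int) (B : List Int) (bits : Int) (mask_all : Int), Dom_max_slices_py A B bits mask_all → Spec_max_slices_py A B bits mask_all (max_slices_py A B bits mask_all)

-- ===== LEMMAS AND PROOFS =====

-- bit-level extensionality for Int, and bridges from PySem's kernel-transparent
-- band/bor/bxor to Mathlib's Int.land/lor/xor (which carry the testBit lemmas)
theorem pv_int_ext {a b : Int} (h : ∀ i, a.testBit i = b.testBit i) : a = b := by
  cases a with
  | ofNat m =>
    cases b with
    | ofNat n =>
      have : m = n := Nat.eq_of_testBit_eq fun i => by simpa [Int.testBit] using h i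
      simp [this]
    | negSucc n =>
      exfalso
      have hm : Nat.testBit m (m + n) = false :=
        Nat.testBit_lt_two_pow (lt_of_lt_of_le Nat.lt_two_pow_self
          (Nat.pow_le_pow_right (by norm_num) (Nat.le_add_right m n)))
      have hn : Nat.testBit n (m + n) = false :=
        Nat.testBit_lt_two_pow (lt_of_lt_of_le Nat.lt_two_pow_self
          (Nat.pow_le_pow_right (by norm_num) (Nat.le_add_left n m)))
      have := h (m + n)
      simp [Int.testBit, hm, hn] at this
  | negSucc m =>
    cases b with
    | ofNat n =>
      exfalso
      have hm : Nat.testBit m (m + n) = false :=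
        Nat.testBit_lt_two_pow (lt_of_lt_of_le Nat.lt_two_pow_self
          (Nat.pow_le_pow_right (by norm_num) (Nat.le_add_right m n)))
      have hn : Nat.testBit n (m + n) = false :=
        Nat.testBit_lt_two_pow (lt_of_lt_of_le Nat.lt_two_pow_self
          (Nat.pow_le_pow_right (by norm_num) (Nat.le_add_left n m)))
      have := h (m + n)
      simp [Int.testBit, hm, hn] at this
    | negSucc n =>
      have : m = n := Nat.eq_of_testBit_eq fun i => by
        have := h i; simpa [Int.testBit] using this
      simp [this]

theorem pv_nat_sub_and (m n : ℕ) : m - (m &&& n) = Nat.ldiff m n := by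
  induction m using Nat.binaryRec generalizing n with
  | zero =>
    have : Nat.ldiff 0 n = 0 := Nat.eq_of_testBit_eq fun i => by
      simp [Nat.testBit_ldiff]
    simp [this]
  | bit b m ih =>
    induction n using Nat.bitCasesOn with
    | bit c n' =>
      rw [Nat.land_bit, Nat.ldiff_bit, ← ih n']
      have hle : m &&& n' ≤ m := Nat.and_le_left
      cases b <;> cases c <;> simp [Nat.bit_val] <;> omega

theorem pv_band_eq_land (a b : Int) : PySem.Int.band a b = Int.land a b := by
  cases a with
  | ofNat m =>
    cases b with
    | ofNat n => simp [PySem.Int.band, Int.land]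
    | negSucc n => simp [PySem.Int.band, Int.land, pv_nat_sub_and]
  | negSucc m =>
    cases b with
    | ofNat n => simp [PySem.Int.band, Int.land, pv_nat_sub_and]
    | negSucc n =>
      have hnm : ¬ (0:Int) ≤ Int.negSucc m := Int.not_le.mpr (Int.negSucc_lt_zero m)
      have hnn : ¬ (0:Int) ≤ Int.negSucc n := Int.not_le.mpr (Int.negSucc_lt_zero n)
      unfold PySem.Int.band
      rw [if_neg hnm, if_neg hnn]
      have hm : (-Int.negSucc m - 1).toNat = m := by simp [Int.neg_negSucc]
      have hn : (-Int.negSucc n - 1).toNat = n := by simp [Int.neg_negSucc]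
      rw [hm, hn]
      show _ = Int.negSucc (m ||| n)
      rw [Int.negSucc_eq]
      ring

theorem pv_bor_eq_lor (a b : Int) : PySem.Int.bor a b = Int.lor a b := by
  cases a with
  | ofNat m =>
    cases b with
    | ofNat n => simp [PySem.Int.bor, Int.lor]
    | negSucc n =>
      simp [PySem.Int.bor, Int.lor, pv_nat_sub_and]
      rw [Int.negSucc_eq]; ring
  | negSucc m =>
    cases b with
    | ofNat n =>
      simp [PySem.Int.bor, Int.lor, pv_nat_sub_and]
      rw [Int.negSucc_eq]; ring
    | negSucc n =>
      have hnm : ¬ (0:Int) ≤ Int.negSucc m := Int.not_le.mpr (Int.negSucc_lt_zero m)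
      have hnn : ¬ (0:Int) ≤ Int.negSucc n := Int.not_le.mpr (Int.negSucc_lt_zero n)
      unfold PySem.Int.bor
      rw [if_neg hnm, if_neg hnn]
      have hm : (-Int.negSucc m - 1).toNat = m := by simp [Int.neg_negSucc]
      have hn : (-Int.negSucc n - 1).toNat = n := by simp [Int.neg_negSucc]
      rw [hm, hn]
      show _ = Int.negSucc (m &&& n)
      rw [Int.negSucc_eq]; ring

theorem pv_bxor_eq_lxor (a b : Int) : PySem.Int.bxor a b = Int.xor a b := by
  cases a with
  | ofNat m =>
    cases b with
    | ofNat n => simp [PySem.Int.bxor, Int.xor]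
    | negSucc n =>
      simp [PySem.Int.bxor, Int.xor]
      rw [Int.negSucc_eq]; ring
  | negSucc m =>
    cases b with
    | ofNat n =>
      simp [PySem.Int.bxor, Int.xor]
      rw [Int.negSucc_eq]; ring
    | negSucc n =>
      have hnm : ¬ (0:Int) ≤ Int.negSucc m := Int.not_le.mpr (Int.negSucc_lt_zero m)
      have hnn : ¬ (0:Int) ≤ Int.negSucc n := Int.not_le.mpr (Int.negSucc_lt_zero n)
      unfold PySem.Int.bxor
      rw [if_neg hnm, if_neg hnn]
      have hm : (-Int.negSucc m - 1).toNat = m := by simp [Int.neg_negSucc]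
      have hn : (-Int.negSucc n - 1).toNat = n := by simp [Int.neg_negSucc]
      rw [hm, hn]
      rfl

theorem pv_testBit_band (a b : Int) (i : ℕ) :
    (PySem.Int.band a b).testBit i = (a.testBit i && b.testBit i) := by
  rw [pv_band_eq_land]; exact Int.testBit_land a b i

theorem pv_testBit_bor (a b : Int) (i : ℕ) :
    (PySem.Int.bor a b).testBit i = (a.testBit i || b.testBit i) := by
  rw [pv_bor_eq_lor]; exact Int.testBit_lor a b i

theorem pv_testBit_bxor (a b : Int) (i : ℕ) :
    (PySem.Int.bxor a b).testBit i = xor (a.testBit i) (b.testBit i) := by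
  rw [pv_bxor_eq_lxor]; exact Int.testBit_lxor a b i

-- the full-subtractor step agrees with the (gt, eq) step on every lane of m
theorem pv_key (m a b c e : Int) (he : PySem.Int.band e m = e) :
    PySem.Int.band e
      (PySem.Int.band
        (PySem.Int.bor (PySem.Int.band (PySem.Int.bxor m a) (PySem.Int.bxor b c))
          (PySem.Int.band b c)) m)
    = PySem.Int.bor (PySem.Int.band (PySem.Int.band e b) (PySem.Int.bxor m a))
        (PySem.Int.band (PySem.Int.band e (PySem.Int.bxor m (PySem.Int.bxor a b))) c) := by
  apply pv_int_ext; intro i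
  have he' := congrArg (fun z => Int.testBit z i) he
  simp only [pv_testBit_band, pv_testBit_bor, pv_testBit_bxor] at he' ⊢
  revert he'
  cases a.testBit i <;> cases b.testBit i <;> cases c.testBit i <;>
    cases m.testBit i <;> cases e.testBit i <;> decide

theorem pv_band_stable (x y m : Int) (h : PySem.Int.band x m = x) :
    PySem.Int.band (PySem.Int.band x y) m = PySem.Int.band x y := by
  apply pv_int_ext; intro i
  have h' := congrArg (fun z => Int.testBit z i) h
  simp only [pv_testBit_band] at h' ⊢
  revert h'
  cases x.testBit i <;> cases y.testBit i <;> cases m.testBit i <;> decide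

theorem pv_band_band_m (t m : Int) :
    PySem.Int.band (PySem.Int.band t m) m = PySem.Int.band t m := by
  apply pv_int_ext; intro i
  simp only [pv_testBit_band]
  cases t.testBit i <;> cases m.testBit i <;> decide

theorem pv_bor_assoc (a b c : Int) :
    PySem.Int.bor (PySem.Int.bor a b) c = PySem.Int.bor a (PySem.Int.bor b c) := by
  apply pv_int_ext; intro i
  simp only [pv_testBit_bor]
  cases a.testBit i <;> cases b.testBit i <;> cases c.testBit i <;> decide

theorem pv_zero_band (m : Int) : PySem.Int.band 0 m = 0 := by
  rw [PySem.Int.band_comm]; exact PySem.Int.band_zero m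

theorem pv_zero_bor (a : Int) : PySem.Int.bor 0 a = a := by
  rw [PySem.Int.bor_comm]; exact PySem.Int.bor_zero a

-- the (gt, eq) scan as a structural foldr (head of the list is processed last,
-- exactly A's descending loop)
def pvGtEq (m : Int) (sa sb : Int → Int) (L : List Int) : Int × Int :=
  L.foldr
    (fun k ge =>
      (PySem.Int.bor ge.1 (PySem.Int.band (PySem.Int.band ge.2 (sb k)) (PySem.Int.bxor m (sa k))),
       PySem.Int.band ge.2 (PySem.Int.bxor m (PySem.Int.bxor (sa k) (sb k)))))
    (0, m)

theorem pv_gtEq_stable (m : Int) (sa sb : Int → Int) (L : List Int) :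
    PySem.Int.band (pvGtEq m sa sb L).2 m = (pvGtEq m sa sb L).2 := by
  induction L with
  | nil => exact PySem.Int.band_self m
  | cons k L ih => exact pv_band_stable _ _ _ ih

theorem pv_loop_eq (m : Int) (sa sb : Int → Int) (L : List Int) (c : Int)
    (hc : PySem.Int.band c m = c) :
    L.foldl
      (fun borrow k =>
        PySem.Int.band
          (PySem.Int.bor
            (PySem.Int.band (PySem.Int.bxor m (sa k)) (PySem.Int.bxor (sb k) borrow))
            (PySem.Int.band (sb k) borrow))
          m) c
    = PySem.Int.bor (pvGtEq m sa sb L).1 (PySem.Int.band (pvGtEq m sa sb L).2 c) := by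
  induction L generalizing c with
  | nil =>
    simp only [List.foldl_nil, pvGtEq, List.foldr_nil]
    rw [PySem.Int.band_comm, hc, pv_zero_bor]
  | cons k L ih =>
    rw [List.foldl_cons, ih _ (pv_band_band_m _ m)]
    show _ = PySem.Int.bor (pvGtEq m sa sb (k :: L)).1 (PySem.Int.band (pvGtEq m sa sb (k :: L)).2 c)
    simp only [pvGtEq, List.foldr_cons]
    rw [pv_bor_assoc]
    congr 1
    exact pv_key m (sa k) (sb k) c (pvGtEq m sa sb L).2 (pv_gtEq_stable m sa sb L)

theorem pv_gt_eq (A B : List Int) (bits m : Int) :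
    ((PySem.List.pyRange (bits - 1) (-1) (-1)).foldl
      (fun (ge : Int × Int) k =>
        (PySem.Int.bor ge.1 (PySem.Int.band (PySem.Int.band ge.2 (pvSl B k)) (PySem.Int.bxor m (pvSl A k))),
         PySem.Int.band ge.2 (PySem.Int.bxor m (PySem.Int.bxor (pvSl A k) (pvSl B k)))))
      (0, m)).1
    = (PySem.List.pyRange 0 bits 1).foldl
        (fun borrow k =>
          PySem.Int.band
            (PySem.Int.bor
              (PySem.Int.band (PySem.Int.bxor m (pvSl A k)) (PySem.Int.bxor (pvSl B k) borrow))
              (PySem.Int.band (pvSl B k) borrow))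
            m) 0 := by
  have hr : PySem.List.pyRange (bits - 1) (-1) (-1) = (PySem.List.pyRange 0 bits 1).reverse := by
    have := PySem.List.pyRange_neg_one_eq_reverse (bits - 1) (-1)
    simpa using this
  rw [hr, List.foldl_reverse,
      pv_loop_eq m (pvSl A) (pvSl B) (PySem.List.pyRange 0 bits 1) 0 (pv_zero_band m)]
  rw [PySem.Int.band_zero, PySem.Int.bor_zero]
  rfl

-- ===== VERDICT (by name: the statement is the Claim_ definition above) =====
theorem max_slices_py_spec : Claim_equal_max_slices_py := by
  intro A B bits mask_all _
  show max_slices_py A B bits mask_all = max_slices_py_alt A B bits mask_all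
  show (PySem.List.pyRange 0 bits 1).map _ = (PySem.List.pyRange 0 bits 1).map _
  have hgt := pv_gt_eq A B bits mask_all
  simp only [pvSl] at hgt ⊢
  rw [hgt]
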